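-- pv_equiv track=rewrite | github.com/Axians-Intern/Axians_Smart_Support | app/clean_sql.py | clean_sql
-- ===== SOURCE A (Python) =====
-- def clean_sql(raw_sql):
--     lines = raw_sql.strip().splitlines()
--     lines = [line for line in lines if not line.strip().startswith("```") and line.strip() != "sql"]
--     for i, line in enumerate(lines):
--         if ";" in line:
--             idx = line.index(";") + 1
--             lines = lines[:i] + [line[:idx]]
--             break
--     return "\n".join(lines).strip()
-- ===== SOURCE B (Python) =====
-- def clean_sql(raw_sql):
--     lines = raw_sql.strip().splitlines()
--     lines = [line for line in lines if not line.strip().startswith("```") and line.strip() != "sql"]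
--     text = "\n".join(lines)
--     semi = text.find(";")
--     if semi != -1:
--         text = text[:semi + 1]
--     return text.strip()
-- ===== Notes on version B (the rewrite author's own statement) =====
-- stated objective: simpler
-- what changed: Replaces A's indexed per-line loop (enumerate, break, list slicing and re-join) by joining the filtered lines once and truncating the whole string at its first semicolon, which is correct because lines before the hit contain no semicolon.
import Mathlib
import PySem

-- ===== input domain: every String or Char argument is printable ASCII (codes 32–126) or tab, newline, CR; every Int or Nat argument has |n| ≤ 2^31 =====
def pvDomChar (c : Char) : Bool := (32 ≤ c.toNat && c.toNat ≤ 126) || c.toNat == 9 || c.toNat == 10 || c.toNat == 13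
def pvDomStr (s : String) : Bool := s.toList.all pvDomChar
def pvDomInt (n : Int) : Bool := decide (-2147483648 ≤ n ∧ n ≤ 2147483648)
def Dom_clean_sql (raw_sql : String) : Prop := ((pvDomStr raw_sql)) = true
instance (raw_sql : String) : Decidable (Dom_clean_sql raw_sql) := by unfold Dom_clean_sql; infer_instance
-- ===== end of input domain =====

-- B replaces A's indexed per-line loop (enumerate / break / list slicing) by one string-level
-- truncation of the joined text at its first ';' — objective: simpler. Same return value everywhere.

-- ===== PORT A =====
-- the 'for i, line in enumerate(lines): if ";" in line: … break' loop; returns the final 'lines'.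
-- 'line.index(";")' is guarded by '";" in line', so it equals PySem.Str.find (never the ValueError case).
def pvCleanLoopA (lines : List String) : List (Int × String) → List String
  | [] => lines
  | (i, line) :: rest =>
    if PySem.Str.isIn ";" line then
      PySem.List.slice lines none (some i) ++
        [PySem.Str.slice line none (some (PySem.Str.find line ";" + 1))]
    else pvCleanLoopA lines rest

def clean_sql (raw_sql : String) : String :=
  let lines := PySem.Str.splitlines (PySem.Str.strip raw_sql)
  let lines := lines.filter (fun line =>
    !(PySem.Str.startswith (PySem.Str.strip line) "```") && !(PySem.Str.strip line == "sql"))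
  PySem.Str.strip (PySem.Str.join "\n" (pvCleanLoopA lines (PySem.List.enumerate lines)))

-- ===== PORT B =====
def clean_sql_alt (raw_sql : String) : String :=
  let lines := PySem.Str.splitlines (PySem.Str.strip raw_sql)
  let lines := lines.filter (fun line =>
    !(PySem.Str.startswith (PySem.Str.strip line) "```") && !(PySem.Str.strip line == "sql"))
  let text := PySem.Str.join "\n" lines
  let semi := PySem.Str.find text ";"
  let text := if semi ≠ -1 then PySem.Str.slice text none (some (semi + 1)) else text
  PySem.Str.strip text

-- ===== PRECONDITION & SPEC =====
def Spec_clean_sql (raw_sql : String) (out : String) : Prop := out = clean_sql_alt raw_sql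
instance (raw_sql : String) (out : String) : Decidable (Spec_clean_sql raw_sql out) := by unfold Spec_clean_sql; infer_instance

-- ===== CLAIM (what is proved, stated in full; the proofs are below) =====
def Claim_equal_clean_sql : Prop := ∀ (raw_sql : String), Dom_clean_sql raw_sql → Spec_clean_sql raw_sql (clean_sql raw_sql)

-- ===== LEMMAS AND PROOFS =====

-- the prefix of cs before its first ';'
def pvTw (cs : List Char) : List Char := cs.takeWhile (· ≠ ';')

-- truncation of a character list at its first ';' (inclusive)
def pvTruncC (cs : List Char) : List Char := if ';' ∈ cs then pvTw cs ++ [';'] else cs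

-- per-line truncation, character level
def pvTruncLinesC : List (List Char) → List (List Char)
  | [] => []
  | l :: rest => if ';' ∈ l then [pvTw l ++ [';']] else l :: pvTruncLinesC rest

-- per-line truncation, string level (mirrors what A's loop produces)
def pvTruncS : List String → List String
  | [] => []
  | l :: rest =>
    if PySem.Str.isIn ";" l then
      [PySem.Str.slice l none (some (PySem.Str.find l ";" + 1))]
    else l :: pvTruncS rest

theorem pvIsIn_iff (l : String) : PySem.Str.isIn ";" l = true ↔ ';' ∈ l.toList := by
  rw [PySem.Str.isIn_iff_infix]
  exact List.singleton_infix_iff ';' l.toList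

theorem pvDecomp {cs : List Char} (h : ';' ∈ cs) : ∃ ds, cs = pvTw cs ++ ';' :: ds := by
  have hd : cs.dropWhile (· ≠ ';') ≠ [] := by
    intro hnil
    have hcs : cs.takeWhile (· ≠ ';') = cs := by
      conv_rhs => rw [← List.takeWhile_append_dropWhile (p := (· ≠ ';')) (l := cs)]
      rw [hnil, List.append_nil]
    have := List.mem_takeWhile_imp (l := cs) (p := (· ≠ ';')) (x := ';') (by rw [hcs]; exact h)
    simp at this
  obtain ⟨d, ds, hds⟩ : ∃ d ds, List.dropWhile (fun x => decide (x ≠ ';')) cs = d :: ds := by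
    cases hdw : List.dropWhile (fun x => decide (x ≠ ';')) cs with
    | nil => exact absurd hdw hd
    | cons d ds => exact ⟨d, ds, rfl⟩
  have hdsemi : d = ';' := by
    have h1 := List.head_dropWhile_not (fun x => decide (x ≠ ';')) hd
    have h2 : (cs.dropWhile (fun x => decide (x ≠ ';'))).head hd = d := by
      simp only [hds, List.head_cons]
    rw [h2] at h1
    simpa using h1
  refine ⟨ds, ?_⟩
  conv_lhs => rw [← List.takeWhile_append_dropWhile (p := fun x => decide (x ≠ ';')) (l := cs)]
  rw [hds, hdsemi]
  rfl

theorem pvNoSemi_tw (cs : List Char) (c : Char) (hc : c ∈ pvTw cs) : c ≠ ';' := by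
  have := List.mem_takeWhile_imp hc
  simpa using this

theorem pvTw_len_eq {cs : List Char} {n : Nat}
    (h1 : [';'] <+: cs.drop n) (h2 : ∀ i < n, ¬ [';'] <+: cs.drop i) :
    (pvTw cs).length = n := by
  induction cs generalizing n with
  | nil =>
    rw [List.drop_nil] at h1
    rcases h1 with ⟨t, ht⟩
    simp at ht
  | cons a t ih =>
    cases n with
    | zero =>
      rw [List.drop_zero] at h1
      rcases h1 with ⟨s, hs⟩
      rw [List.cons_append] at hs
      have ha : a = ';' := by injection hs.symm
      simp [pvTw, ha]
    | succ m =>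
      have ha : a ≠ ';' := by
        intro hha
        exact h2 0 (Nat.succ_pos m) ⟨t, by rw [List.drop_zero, hha]; rfl⟩
      have h1' : [';'] <+: t.drop m := by simpa using h1
      have h2' : ∀ i < m, ¬ [';'] <+: t.drop i := by
        intro i hi hp
        exact h2 (i + 1) (Nat.succ_lt_succ hi) (by simpa using hp)
      have := ih h1' h2'
      simp [pvTw, ha] at this ⊢
      omega

theorem pvFind_semi {cs : List Char} (h : ';' ∈ cs) :
    PySem.Chars.find cs [';'] = ((pvTw cs).length : Int) := by
  have hin : [';'] <:+: cs := (List.singleton_infix_iff ';' cs).mpr h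
  have h0 : 0 ≤ PySem.Chars.find cs [';'] := (PySem.Chars.find_nonneg_iff cs [';']).mpr hin
  obtain ⟨hpre, hmin⟩ := PySem.Chars.find_spec h0
  have := pvTw_len_eq hpre hmin
  omega

theorem pvTake_tw {cs : List Char} (h : ';' ∈ cs) :
    cs.take ((pvTw cs).length + 1) = pvTw cs ++ [';'] := by
  obtain ⟨ds, hds⟩ := pvDecomp h
  nth_rewrite 2 [hds]
  rw [List.take_append]
  simp

theorem pvTruncC_append_no {x : List Char} (t : List Char) (hx : ';' ∉ x) :
    pvTruncC (x ++ t) = x ++ pvTruncC t := by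
  have hall : ∀ c ∈ x, ((· ≠ ';') c : Bool) := by
    intro c hc; simp; intro hcc; exact hx (hcc ▸ hc)
  by_cases ht : ';' ∈ t
  · rw [pvTruncC, if_pos (by simp [ht]), pvTruncC, if_pos ht, pvTw, pvTw,
      List.takeWhile_append_of_pos hall]
    simp
  · rw [pvTruncC, if_neg (by simp [hx, ht]), pvTruncC, if_neg ht]

theorem pvTruncC_append_yes {x : List Char} (t : List Char) (hx : ';' ∈ x) :
    pvTruncC (x ++ t) = pvTw x ++ [';'] := by
  have hall : ∀ c ∈ pvTw x, ((· ≠ ';') c : Bool) := by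
    intro c hc; simpa using pvNoSemi_tw x c hc
  obtain ⟨ds, hds⟩ := pvDecomp hx
  have hx' : x ++ t = pvTw x ++ ';' :: (ds ++ t) := by
    conv_lhs => rw [hds]
    simp
  rw [pvTruncC, if_pos (by simp [hx]), hx', pvTw, List.takeWhile_append_of_pos hall]
  simp [pvTw]

theorem pvTruncLinesC_ne_nil (l : List Char) (rest : List (List Char)) :
    pvTruncLinesC (l :: rest) ≠ [] := by
  rw [pvTruncLinesC]
  split <;> simp

-- joining then truncating at the first ';' equals truncating per line then joining
theorem pvJoin_trunc (ls : List (List Char)) :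
    PySem.Chars.join ['\n'] (pvTruncLinesC ls) = pvTruncC (PySem.Chars.join ['\n'] ls) := by
  induction ls with
  | nil => simp [pvTruncLinesC, PySem.Chars.join_nil, pvTruncC]
  | cons l rest ih =>
    cases rest with
    | nil =>
      by_cases hl : ';' ∈ l
      · rw [pvTruncLinesC, if_pos hl, PySem.Chars.join_singleton, PySem.Chars.join_singleton,
          pvTruncC, if_pos hl]
      · simp [pvTruncLinesC, hl, PySem.Chars.join_singleton, pvTruncC]
    | cons r t =>
      by_cases hl : ';' ∈ l
      · rw [pvTruncLinesC, if_pos hl, PySem.Chars.join_singleton, PySem.Chars.join_cons_cons,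
          List.append_assoc, pvTruncC_append_yes _ hl]
      · rw [pvTruncLinesC, if_neg hl]
        obtain ⟨x, xs, hX⟩ : ∃ x xs, pvTruncLinesC (r :: t) = x :: xs := by
          cases h : pvTruncLinesC (r :: t) with
          | nil => exact absurd h (pvTruncLinesC_ne_nil r t)
          | cons x xs => exact ⟨x, xs, rfl⟩
        rw [hX, PySem.Chars.join_cons_cons, ← hX, ih, PySem.Chars.join_cons_cons]
        have hx : ';' ∉ l ++ ['\n'] := by simp [hl]
        rw [pvTruncC_append_no (PySem.Chars.join ['\n'] (r :: t)) hx, List.append_assoc]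

-- A's loop equals per-line truncation appended to the untouched prefix
theorem pvLoopA_eq (suf : List String) : ∀ (pre : List String),
    pvCleanLoopA (pre ++ suf) (PySem.List.enumerate suf (pre.length : Int)) =
      pre ++ pvTruncS suf := by
  induction suf with
  | nil => intro pre; simp [pvCleanLoopA, PySem.List.enumerate_nil, pvTruncS]
  | cons l rest ih =>
    intro pre
    rw [PySem.List.enumerate_cons, pvCleanLoopA]
    by_cases hl : PySem.Str.isIn ";" l
    · rw [if_pos hl, PySem.List.slice_to_natCast, pvTruncS, if_pos hl,
        List.take_left]
    · rw [if_neg hl, pvTruncS, if_neg hl]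
      have h1 : pre ++ l :: rest = (pre ++ [l]) ++ rest := by simp
      have h2 : (pre.length : Int) + 1 = ((pre ++ [l]).length : Int) := by
        simp
      rw [h1, h2, ih (pre ++ [l])]
      simp

-- string-level per-line truncation is the char-level one
theorem pvTruncS_toList (ls : List String) :
    (pvTruncS ls).map String.toList = pvTruncLinesC (ls.map String.toList) := by
  induction ls with
  | nil => simp [pvTruncS, pvTruncLinesC]
  | cons l rest ih =>
    by_cases hl : ';' ∈ l.toList
    · have hIn : PySem.Str.isIn ";" l = true := (pvIsIn_iff l).mpr hl
      rw [pvTruncS, if_pos hIn, List.map_cons, List.map_cons]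
      rw [show pvTruncLinesC (l.toList :: rest.map String.toList) =
            [pvTw l.toList ++ [';']] from by rw [pvTruncLinesC, if_pos hl]]
      simp only [List.map_nil, List.cons.injEq, and_true]
      rw [PySem.Str.toList_slice]
      have hfind : PySem.Str.find l ";" = ((pvTw l.toList).length : Int) := by
        rw [PySem.Str.find_eq]
        exact pvFind_semi hl
      rw [hfind]
      have : ((pvTw l.toList).length : Int) + 1 = (((pvTw l.toList).length + 1 : Nat) : Int) := by
        push_cast; ring
      rw [this]
      simp only [PySem.Chars.slice_eq_listSlice, PySem.List.slice_to_natCast]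
      exact pvTake_tw hl
    · have hIn : ¬ PySem.Str.isIn ";" l = true := fun h => hl ((pvIsIn_iff l).mp h)
      rw [pvTruncS, if_neg hIn, List.map_cons, List.map_cons]
      rw [show pvTruncLinesC (l.toList :: rest.map String.toList) =
            l.toList :: pvTruncLinesC (rest.map String.toList) from by
          rw [pvTruncLinesC, if_neg hl]]
      rw [ih]

-- B's conditional slice is pvTruncC, character level
theorem pvAltTrunc_toList (text : String) :
    (if PySem.Str.find text ";" ≠ -1 then
        PySem.Str.slice text none (some (PySem.Str.find text ";" + 1))
      else text).toList = pvTruncC text.toList := by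
  by_cases h : ';' ∈ text.toList
  · have hfind : PySem.Str.find text ";" = ((pvTw text.toList).length : Int) := by
      rw [PySem.Str.find_eq]; exact pvFind_semi h
    rw [if_pos (by rw [hfind]; omega), PySem.Str.toList_slice, hfind]
    have : ((pvTw text.toList).length : Int) + 1 = (((pvTw text.toList).length + 1 : Nat) : Int) := by
      push_cast; ring
    rw [this]
    simp only [PySem.Chars.slice_eq_listSlice, PySem.List.slice_to_natCast]
    rw [pvTruncC, if_pos h]
    exact pvTake_tw h
  · have h2 : ¬ ([';'] <:+: text.toList) :=
      fun hin => h ((List.singleton_infix_iff ';' text.toList).mp hin)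
    rw [if_neg (by
      simp only [ne_eq, not_not, PySem.Str.find_eq, show (";" : String).toList = [';'] from rfl]
      exact (PySem.Chars.find_eq_neg_one_iff text.toList [';']).mpr h2), pvTruncC, if_neg h]

-- ===== VERDICT (by name: the statement is the Claim_ definition above) =====
theorem pvMain (L : List String) :
    PySem.Str.strip (PySem.Str.join "\n" (pvCleanLoopA L (PySem.List.enumerate L))) =
      PySem.Str.strip
        (if PySem.Str.find (PySem.Str.join "\n" L) ";" ≠ -1 then
            PySem.Str.slice (PySem.Str.join "\n" L) none
              (some (PySem.Str.find (PySem.Str.join "\n" L) ";" + 1))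
          else PySem.Str.join "\n" L) := by
  apply String.toList_inj.mp
  rw [PySem.Str.toList_strip, PySem.Str.toList_strip]
  congr 1
  have hloop : pvCleanLoopA L (PySem.List.enumerate L) = pvTruncS L := by
    have := pvLoopA_eq L []
    simpa using this
  rw [hloop, PySem.Str.toList_join, pvAltTrunc_toList, PySem.Str.toList_join,
    pvTruncS_toList]
  have hsep : ("\n" : String).toList = ['\n'] := rfl
  rw [hsep]
  exact pvJoin_trunc (L.map String.toList)

theorem clean_sql_spec : Claim_equal_clean_sql := by
  intro raw_sql _
  show clean_sql raw_sql = clean_sql_alt raw_sql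
  exact pvMain ((PySem.Str.splitlines (PySem.Str.strip raw_sql)).filter (fun line =>
    !(PySem.Str.startswith (PySem.Str.strip line) "```") && !(PySem.Str.strip line == "sql")))
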